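-- pv_equiv track=rewrite | github.com/Elizaveta-Vinogradova/cursor | main.py | stylize
-- ===== SOURCE A (Python) =====
-- def _build_mapping() -> dict[str, str]:
--     # 15 replacements (ASCII letters -> symbols)
--     return {
--         "a": "∆",
--         "b": "■",
--         "c": "¢",
--         "d": "◊",
--         "e": "€",
--         "f": "ƒ",
--         "g": "ɢ",
--         "h": "Ħ",
--         "i": "¡",
--         "j": "ʝ",
--         "k": "Ҡ",
--         "l": "Ł",
--         "m": "₥",
--         "n": "₦",
--         "o": "⊙",
--     }
--
-- def stylize(text: str) -> str:
--     mapping = _build_mapping()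
--     out: list[str] = []
--     for ch in text:
--         lower = ch.lower()
--         repl = mapping.get(lower)
--         if repl is None:
--             out.append(ch)
--             continue
--
--         if ch.isupper():
--             out.append(repl.upper())
--         else:
--             out.append(repl)
--     return "".join(out)
-- ===== SOURCE B (Python) =====
-- # Single precomputed translation table covering both cases; one translate pass,
-- # no per-character lower/isupper branching.
-- _STYLE_TABLE = str.maketrans({
--     "a": "∆", "b": "■", "c": "¢", "d": "◊", "e": "€",
--     "f": "ƒ", "g": "ɢ", "h": "Ħ", "i": "¡", "j": "ʝ",
--     "k": "Ҡ", "l": "Ł", "m": "₥", "n": "₦", "o": "⊙",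
--     "A": "∆", "B": "■", "C": "¢", "D": "◊", "E": "€",
--     "F": "Ƒ", "G": "ɢ", "H": "Ħ", "I": "¡", "J": "Ʝ",
--     "K": "Ҡ", "L": "Ł", "M": "₥", "N": "₦", "O": "⊙",
-- })
--
-- def stylize(text: str) -> str:
--     return text.translate(_STYLE_TABLE)
-- ===== Notes on version B (the rewrite author's own statement) =====
-- stated objective: idiomatic
-- what changed: B precomputes one complete case-covering translation table (30 entries, uppercase symbols baked in) and does a single str.translate pass, removing A's per-character lower()/get/isupper()/upper() branching.
import Mathlib
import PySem

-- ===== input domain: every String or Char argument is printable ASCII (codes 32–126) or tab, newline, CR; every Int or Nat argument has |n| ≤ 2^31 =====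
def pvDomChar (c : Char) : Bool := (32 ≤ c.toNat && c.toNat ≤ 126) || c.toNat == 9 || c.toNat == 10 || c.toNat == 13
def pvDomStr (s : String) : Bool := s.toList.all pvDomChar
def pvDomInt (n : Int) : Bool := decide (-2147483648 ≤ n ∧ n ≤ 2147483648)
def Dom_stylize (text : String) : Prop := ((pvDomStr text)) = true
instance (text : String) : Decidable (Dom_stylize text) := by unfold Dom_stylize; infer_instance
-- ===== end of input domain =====

-- B builds one complete case-covering translation table and does a single lookup pass,
-- instead of A's per-character lower()/get/isupper()/upper() branching (objective: idiomatic).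

-- ===== PORT A =====
def pvMappingA : PySem.Dict Char Char :=
  PySem.Dict.ofList [('a', '∆'), ('b', '■'), ('c', '¢'), ('d', '◊'), ('e', '€'),
                     ('f', 'ƒ'), ('g', 'ɢ'), ('h', 'Ħ'), ('i', '¡'), ('j', 'ʝ'),
                     ('k', 'Ҡ'), ('l', 'Ł'), ('m', '₥'), ('n', '₦'), ('o', '⊙')]

-- hand port of str.upper for repl: exact on the 15 mapping values above
-- (Python: only 'ƒ'.upper() = 'Ƒ' and 'ʝ'.upper() = 'Ʝ'; the other 13 symbols are caseless)
def pvSymUpper (c : Char) : Char :=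
  if c = 'ƒ' then 'Ƒ' else if c = 'ʝ' then 'Ʝ' else c

def stylize (text : String) : String :=
  String.ofList (text.toList.foldl (fun out ch =>
    let lower := PySem.Chars.lowerChar ch
    match pvMappingA.get? lower with
    | none => out ++ [ch]
    | some repl =>
      if PySem.Chars.isupper ch then out ++ [pvSymUpper repl] else out ++ [repl]) [])

-- ===== PORT B =====
def pvStyleTable : PySem.Dict Char Char :=
  PySem.Dict.ofList [('a', '∆'), ('b', '■'), ('c', '¢'), ('d', '◊'), ('e', '€'),
                     ('f', 'ƒ'), ('g', 'ɢ'), ('h', 'Ħ'), ('i', '¡'), ('j', 'ʝ'),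
                     ('k', 'Ҡ'), ('l', 'Ł'), ('m', '₥'), ('n', '₦'), ('o', '⊙'),
                     ('A', '∆'), ('B', '■'), ('C', '¢'), ('D', '◊'), ('E', '€'),
                     ('F', 'Ƒ'), ('G', 'ɢ'), ('H', 'Ħ'), ('I', '¡'), ('J', 'Ʝ'),
                     ('K', 'Ҡ'), ('L', 'Ł'), ('M', '₥'), ('N', '₦'), ('O', '⊙')]

def stylize_alt (text : String) : String :=
  String.ofList (text.toList.map (fun c => pvStyleTable.getD c c))

-- ===== PRECONDITION & SPEC =====
def Spec_stylize (text : String) (out : String) : Prop := out = stylize_alt text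
instance (text : String) (out : String) : Decidable (Spec_stylize text out) := by unfold Spec_stylize; infer_instance

-- ===== CLAIM (what is proved, stated in full; the proofs are below) =====
def Claim_equal_stylize : Prop := ∀ (text : String), Dom_stylize text → Spec_stylize text (stylize text)

-- ===== LEMMAS AND PROOFS =====

-- A's per-character result, named for the proof
def pvCharA (ch : Char) : Char :=
  match pvMappingA.get? (PySem.Chars.lowerChar ch) with
  | none => ch
  | some repl => if PySem.Chars.isupper ch then pvSymUpper repl else repl

theorem pvFoldlA_eq_map (l : List Char) :
    (l.foldl (fun out ch =>
      let lower := PySem.Chars.lowerChar ch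
      match pvMappingA.get? lower with
      | none => out ++ [ch]
      | some repl =>
        if PySem.Chars.isupper ch then out ++ [pvSymUpper repl] else out ++ [repl]) [])
    = l.map pvCharA := by
  have h : ∀ (acc : List Char), l.foldl (fun out ch =>
      let lower := PySem.Chars.lowerChar ch
      match pvMappingA.get? lower with
      | none => out ++ [ch]
      | some repl =>
        if PySem.Chars.isupper ch then out ++ [pvSymUpper repl] else out ++ [repl]) acc
      = acc ++ l.map pvCharA := by
    induction l with
    | nil => simp
    | cons c t ih =>
      intro acc
      simp only [List.foldl_cons, List.map_cons]
      rw [ih]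
      unfold pvCharA
      cases hc : pvMappingA.get? (PySem.Chars.lowerChar c) with
      | none => simp
      | some repl => by_cases hu : PySem.Chars.isupper c <;> simp [hu]
  simpa using h []

-- per-character agreement on every ASCII code point (covers the whole of Dom_stylize)
set_option maxRecDepth 8192 in
theorem pvChar_agree_fin : ∀ n : Fin 128, pvCharA (Char.ofNat n.val) = pvStyleTable.getD (Char.ofNat n.val) (Char.ofNat n.val) := by
  decide

theorem pvChar_agree (c : Char) (h : pvDomChar c = true) :
    pvCharA c = pvStyleTable.getD c c := by
  have hlt : c.toNat < 128 := by
    simp only [pvDomChar, Bool.or_eq_true, Bool.and_eq_true, beq_iff_eq,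
      decide_eq_true_eq] at h
    omega
  have := pvChar_agree_fin ⟨c.toNat, hlt⟩
  rwa [Char.ofNat_toNat] at this

-- ===== VERDICT (by name: the statement is the Claim_ definition above) =====
theorem stylize_spec : Claim_equal_stylize := by
  intro text hdom
  unfold Spec_stylize stylize stylize_alt
  rw [pvFoldlA_eq_map]
  congr 1
  apply List.map_congr_left
  intro c hc
  exact pvChar_agree c (by
    have := (List.all_eq_true.mp hdom) c hc
    simpa using this)
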